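-- pv_equiv track=rewrite | github.com/felizvida/genomeforge | web_ui.py | _merge_gapped_reference
-- ===== SOURCE A (Python) =====
-- from typing import Any, Dict, List, Tuple
--
-- def _merge_gapped_reference(
--     old_ref: str,
--     old_rows: List[str],
--     new_ref: str,
--     new_row: str,
-- ) -> Tuple[List[str], str]:
--     i = j = 0
--     merged_rows = ["" for _ in old_rows]
--     merged_new = ""
--     while i < len(old_ref) or j < len(new_ref):
--         co = old_ref[i] if i < len(old_ref) else None
--         cn = new_ref[j] if j < len(new_ref) else None
--         if co is None:
--             for k in range(len(merged_rows)):
--                 merged_rows[k] += "-"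
--             merged_new += new_row[j]
--             j += 1
--             continue
--         if cn is None:
--             for k in range(len(merged_rows)):
--                 merged_rows[k] += old_rows[k][i]
--             merged_new += "-"
--             i += 1
--             continue
--         if co == cn:
--             for k in range(len(merged_rows)):
--                 merged_rows[k] += old_rows[k][i]
--             merged_new += new_row[j]
--             i += 1
--             j += 1
--         elif co == "-":
--             for k in range(len(merged_rows)):
--                 merged_rows[k] += old_rows[k][i]
--             merged_new += "-"
--             i += 1
--         elif cn == "-":
--             for k in range(len(merged_rows)):
--                 merged_rows[k] += "-"
--             merged_new += new_row[j]
--             j += 1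
--         else:
--             for k in range(len(merged_rows)):
--                 merged_rows[k] += old_rows[k][i]
--             merged_new += new_row[j]
--             i += 1
--             j += 1
--     return merged_rows, merged_new
-- ===== SOURCE B (Python) =====
-- from typing import List, Tuple
--
-- def _merge_gapped_reference(
--     old_ref: str,
--     old_rows: List[str],
--     new_ref: str,
--     new_row: str,
-- ) -> Tuple[List[str], str]:
--     # Phase 1: two-pointer merge over the two references only, recording per
--     # column whether to consume a char from the old side and/or the new side.
--     ops = []
--     i = j = 0
--     while i < len(old_ref) or j < len(new_ref):
--         if i >= len(old_ref):
--             ops.append((False, True)); j += 1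
--         elif j >= len(new_ref):
--             ops.append((True, False)); i += 1
--         else:
--             co, cn = old_ref[i], new_ref[j]
--             if co == cn:
--                 ops.append((True, True)); i += 1; j += 1
--             elif co == "-":
--                 ops.append((True, False)); i += 1
--             elif cn == "-":
--                 ops.append((False, True)); j += 1
--             else:
--                 ops.append((True, True)); i += 1; j += 1
--     # Phase 2: emit each output string independently by one walk of the ops.
--     def emit(src, use_old):
--         out = []
--         p = 0
--         for take_old, take_new in ops:
--             if (take_old if use_old else take_new):
--                 out.append(src[p]); p += 1
--             else:
--                 out.append("-")
--         return "".join(out)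
--     return [emit(r, True) for r in old_rows], emit(new_row, False)
-- ===== Notes on version B (the rewrite author's own statement) =====
-- stated objective: alternative
-- what changed: Separates the merge decision from string emission: a first two-pointer pass over only the two references records a per-column (consume-old, consume-new) op list, then merged_new and each merged row are each built by one independent walk of the op list (inverting A's per-column inner loop over all rows).
import Mathlib
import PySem

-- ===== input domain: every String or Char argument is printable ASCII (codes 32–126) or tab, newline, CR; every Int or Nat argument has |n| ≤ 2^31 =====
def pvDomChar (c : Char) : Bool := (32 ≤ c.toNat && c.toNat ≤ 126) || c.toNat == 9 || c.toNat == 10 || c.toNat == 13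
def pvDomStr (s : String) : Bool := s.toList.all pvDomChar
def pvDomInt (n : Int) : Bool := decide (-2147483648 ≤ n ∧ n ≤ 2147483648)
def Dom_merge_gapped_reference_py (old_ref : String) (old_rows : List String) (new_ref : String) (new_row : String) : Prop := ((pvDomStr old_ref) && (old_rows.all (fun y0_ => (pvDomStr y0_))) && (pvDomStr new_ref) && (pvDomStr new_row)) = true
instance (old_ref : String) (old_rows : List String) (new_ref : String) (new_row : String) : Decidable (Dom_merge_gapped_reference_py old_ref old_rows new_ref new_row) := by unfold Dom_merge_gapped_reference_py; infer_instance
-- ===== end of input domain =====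

-- B separates the merge decision from string emission (op list, then one walk per
-- output string); equivalence of return values is proved for rows/new_row long
-- enough to index (Pre_), where Python A returns without IndexError.

-- ===== PORT A =====
-- Port of A's while-loop: indices i j, per-column append to every merged row and
-- to merged_new, in A's five-branch order.  On Pre_ every indexed character
-- exists, so the `getD … ' '` defaults are never used (Python raises there).
def mergeA_loop (o n : List Char) (orows : List (List Char)) (nrow : List Char) :
    Nat → Nat → Nat → List (List Char) → List Char → List (List Char) × List Char
  | 0, _, _, mrows, mnew => (mrows, mnew)   -- fuel 0: never reached from the entry call below
  | fuel + 1, i, j, mrows, mnew =>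
    if i < o.length ∨ j < n.length then
      match o[i]?, n[j]? with
      | none, _ =>
          mergeA_loop o n orows nrow fuel i (j+1)
            (mrows.map (fun m => m ++ ['-'])) (mnew ++ [nrow.getD j ' '])
      | some _, none =>
          mergeA_loop o n orows nrow fuel (i+1) j
            (List.zipWith (fun m r => m ++ [r.getD i ' ']) mrows orows) (mnew ++ ['-'])
      | some co, some cn =>
          if co = cn then
            mergeA_loop o n orows nrow fuel (i+1) (j+1)
              (List.zipWith (fun m r => m ++ [r.getD i ' ']) mrows orows) (mnew ++ [nrow.getD j ' '])
          else if co = '-' then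
            mergeA_loop o n orows nrow fuel (i+1) j
              (List.zipWith (fun m r => m ++ [r.getD i ' ']) mrows orows) (mnew ++ ['-'])
          else if cn = '-' then
            mergeA_loop o n orows nrow fuel i (j+1)
              (mrows.map (fun m => m ++ ['-'])) (mnew ++ [nrow.getD j ' '])
          else
            mergeA_loop o n orows nrow fuel (i+1) (j+1)
              (List.zipWith (fun m r => m ++ [r.getD i ' ']) mrows orows) (mnew ++ [nrow.getD j ' '])
    else
      (mrows, mnew)

def merge_gapped_reference_py (old_ref : String) (old_rows : List String)
    (new_ref : String) (new_row : String) : List String × String :=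
  let r := mergeA_loop old_ref.toList new_ref.toList (old_rows.map String.toList)
             new_row.toList (old_ref.toList.length + new_ref.toList.length) 0 0
             (old_rows.map (fun _ => [])) []
  (r.1.map String.ofList, String.ofList r.2)

-- ===== PORT B =====
-- Port of B: phase 1 builds the per-column op list (consume-old?, consume-new?)
-- by a two-pointer walk over the references only; phase 2 emits each output
-- string independently by one walk of the op list with its own source pointer.
def opsB (o n : List Char) : Nat → Nat → Nat → List (Bool × Bool) → List (Bool × Bool)
  | 0, _, _, acc => acc   -- fuel 0: never reached from the entry call below
  | fuel + 1, i, j, acc =>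
    if i < o.length ∨ j < n.length then
      if ¬ i < o.length then
        opsB o n fuel i (j+1) (acc ++ [(false, true)])
      else if ¬ j < n.length then
        opsB o n fuel (i+1) j (acc ++ [(true, false)])
      else
        let co := o.getD i ' '
        let cn := n.getD j ' '
        if co = cn then opsB o n fuel (i+1) (j+1) (acc ++ [(true, true)])
        else if co = '-' then opsB o n fuel (i+1) j (acc ++ [(true, false)])
        else if cn = '-' then opsB o n fuel i (j+1) (acc ++ [(false, true)])
        else opsB o n fuel (i+1) (j+1) (acc ++ [(true, true)])
    else acc

def emitB (ops : List (Bool × Bool)) (src : List Char) (useOld : Bool) (p : Nat) : List Char :=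
  match ops with
  | [] => []
  | op :: rest =>
      if (if useOld then op.1 else op.2) then
        src.getD p ' ' :: emitB rest src useOld (p+1)
      else
        '-' :: emitB rest src useOld p

def merge_gapped_reference_py_alt (old_ref : String) (old_rows : List String)
    (new_ref : String) (new_row : String) : List String × String :=
  let ops := opsB old_ref.toList new_ref.toList (old_ref.toList.length + new_ref.toList.length) 0 0 []
  (old_rows.map (fun r => String.ofList (emitB ops r.toList true 0)),
   String.ofList (emitB ops new_row.toList false 0))

-- ===== PRECONDITION & SPEC =====
-- Pre_ excludes exactly the inputs on which Python A raises IndexError: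
-- some row of old_rows shorter than old_ref, or new_row shorter than new_ref
-- (the loop indexes every position of old_ref into each row and of new_ref into new_row).
def Pre_merge_gapped_reference_py (old_ref : String) (old_rows : List String)
    (new_ref : String) (new_row : String) : Prop :=
  (∀ r ∈ old_rows, old_ref.toList.length ≤ r.toList.length) ∧
    new_ref.toList.length ≤ new_row.toList.length
instance (old_ref : String) (old_rows : List String) (new_ref : String) (new_row : String) : Decidable (Pre_merge_gapped_reference_py old_ref old_rows new_ref new_row) := by unfold Pre_merge_gapped_reference_py; infer_instance

def pvWitness_merge_gapped_reference_py : String × List String × String × String :=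
  ("AC-G", ["ACTG", "AC-C"], "A-CG", "ATCG")

def Spec_merge_gapped_reference_py (old_ref : String) (old_rows : List String) (new_ref : String) (new_row : String) (out : List String × String) : Prop := out = merge_gapped_reference_py_alt old_ref old_rows new_ref new_row
instance (old_ref : String) (old_rows : List String) (new_ref : String) (new_row : String) (out : List String × String) : Decidable (Spec_merge_gapped_reference_py old_ref old_rows new_ref new_row out) := by unfold Spec_merge_gapped_reference_py; infer_instance

-- ===== CLAIM (what is proved, stated in full; the proofs are below) =====
def Claim_equal_merge_gapped_reference_py : Prop := ∀ (old_ref : String) (old_rows : List String) (new_ref : String) (new_row : String), Dom_merge_gapped_reference_py old_ref old_rows new_ref new_row → Pre_merge_gapped_reference_py old_ref old_rows new_ref new_row → Spec_merge_gapped_reference_py old_ref old_rows new_ref new_row (merge_gapped_reference_py old_ref old_rows new_ref new_row)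

-- ===== LEMMAS AND PROOFS =====

-- Structural (suffix-based) description of B's op list.
def opsL : List Char → List Char → List (Bool × Bool)
  | [], [] => []
  | [], _ :: ns => (false, true) :: opsL [] ns
  | _ :: os, [] => (true, false) :: opsL os []
  | co :: os, cn :: ns =>
      if co = cn then (true, true) :: opsL os ns
      else if co = '-' then (true, false) :: opsL os (cn :: ns)
      else if cn = '-' then (false, true) :: opsL (co :: os) ns
      else (true, true) :: opsL os ns
termination_by o n => o.length + n.length

-- Structural emission: consume the source from the front.
def emitL : List (Bool × Bool) → List Char → Bool → List Char
  | [], _, _ => []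
  | op :: rest, src, useOld =>
      if (if useOld then op.1 else op.2) then
        src.headD ' ' :: emitL rest src.tail useOld
      else
        '-' :: emitL rest src useOld

theorem emitB_eq_emitL (ops : List (Bool × Bool)) (src : List Char) (useOld : Bool) (p : Nat) :
    emitB ops src useOld p = emitL ops (src.drop p) useOld := by
  induction ops generalizing p with
  | nil => simp [emitB, emitL]
  | cons op rest ih =>
      have h1 : src.getD p ' ' = (src.drop p).headD ' ' := by
        simp [List.getD_eq_getElem?_getD]
      have h2 : src.drop (p+1) = (src.drop p).tail := by
        simp [List.tail_drop]
      simp only [emitB, emitL, ih, h1, h2]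

theorem opsB_eq_opsL (o n : List Char) (fuel i j : Nat) (acc : List (Bool × Bool)) :
    (o.length - i) + (n.length - j) ≤ fuel →
    opsB o n fuel i j acc = acc ++ opsL (o.drop i) (n.drop j) := by
  induction fuel generalizing i j acc with
  | zero =>
      intro hf
      simp only [opsB]
      rw [List.drop_eq_nil_of_le (by omega), List.drop_eq_nil_of_le (by omega)]
      simp [opsL]
  | succ fuel ih =>
      intro hf
      simp only [opsB]
      by_cases hlt : i < o.length ∨ j < n.length
      · rw [if_pos hlt]
        by_cases h1 : ¬ i < o.length
        · rw [if_pos h1, ih i (j+1) _ (by omega)]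
          rw [List.drop_eq_nil_of_le (show o.length ≤ i by omega), List.drop_eq_getElem_cons (by omega : j < n.length)]
          simp only [opsL]
          simp
        · rw [if_neg h1]
          have hin : i < o.length := by omega
          by_cases h2 : ¬ j < n.length
          · rw [if_pos h2, ih (i+1) j _ (by omega)]
            rw [List.drop_eq_nil_of_le (show n.length ≤ j by omega), List.drop_eq_getElem_cons hin]
            simp only [opsL]
            simp
          · rw [if_neg h2]
            have hjn : j < n.length := by omega
            have hgo : o.getD i ' ' = o[i] := by
              simp [List.getD_eq_getElem?_getD, List.getElem?_eq_getElem hin]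
            have hgn : n.getD j ' ' = n[j] := by
              simp [List.getD_eq_getElem?_getD, List.getElem?_eq_getElem hjn]
            simp only [hgo, hgn]
            by_cases hc1 : o[i] = n[j]
            · rw [if_pos hc1, ih (i+1) (j+1) _ (by omega),
                  List.drop_eq_getElem_cons hin, List.drop_eq_getElem_cons hjn]
              simp only [opsL]
              rw [if_pos hc1]
              simp
            · rw [if_neg hc1]
              by_cases hc2 : o[i] = '-'
              · rw [if_pos hc2, ih (i+1) j _ (by omega),
                    List.drop_eq_getElem_cons hin, List.drop_eq_getElem_cons hjn]
                simp only [opsL]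
                rw [if_neg hc1, if_pos hc2]
                simp
              · rw [if_neg hc2]
                by_cases hc3 : n[j] = '-'
                · rw [if_pos hc3, ih i (j+1) _ (by omega),
                      List.drop_eq_getElem_cons hin, List.drop_eq_getElem_cons hjn]
                  simp only [opsL]
                  rw [if_neg hc1, if_neg hc2, if_pos hc3]
                  simp
                · rw [if_neg hc3, ih (i+1) (j+1) _ (by omega),
                      List.drop_eq_getElem_cons hin, List.drop_eq_getElem_cons hjn]
                  simp only [opsL]
                  rw [if_neg hc1, if_neg hc2, if_neg hc3]
                  simp
      · rw [if_neg hlt]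
        rw [List.drop_eq_nil_of_le (by omega), List.drop_eq_nil_of_le (by omega)]
        simp [opsL]

theorem zipWith_zipWith_right {α β γ δ : Type} (f : γ → β → δ) (g : α → β → γ)
    (l1 : List α) (l2 : List β) :
    List.zipWith f (List.zipWith g l1 l2) l2 = List.zipWith (fun a b => f (g a b) b) l1 l2 := by
  induction l1 generalizing l2 with
  | nil => simp
  | cons a l1 ih => cases l2 <;> simp [ih]

theorem zipWith_left {α β : Type} (l1 : List α) (l2 : List β) (h : l1.length ≤ l2.length) :
    List.zipWith (fun a _ => a) l1 l2 = l1 := by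
  induction l1 generalizing l2 with
  | nil => simp
  | cons a l1 ih =>
      cases l2 with
      | nil => simp at h
      | cons b l2 => simp_all

-- Main invariant: A's loop from (i, j) equals the accumulators extended by the
-- structural op-list emissions on the suffixes (B's per-source pointer always
-- equals A's index, so both sides read the same characters).
theorem mergeA_loop_eq (o n : List Char) (orows : List (List Char)) (nrow : List Char)
    (fuel i j : Nat) (mrows : List (List Char)) (mnew : List Char) :
    (o.length - i) + (n.length - j) ≤ fuel →
    mrows.length = orows.length →
    mergeA_loop o n orows nrow fuel i j mrows mnew =
      (List.zipWith (fun m r => m ++ emitL (opsL (o.drop i) (n.drop j)) (r.drop i) true) mrows orows,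
       mnew ++ emitL (opsL (o.drop i) (n.drop j)) (nrow.drop j) false) := by
  induction fuel generalizing i j mrows mnew with
  | zero =>
      intro hf hm
      simp only [mergeA_loop]
      rw [List.drop_eq_nil_of_le (by omega), List.drop_eq_nil_of_le (by omega)]
      simp only [opsL, emitL, List.append_nil]
      rw [zipWith_left mrows orows (by omega)]
  | succ fuel ih =>
      intro hf hm
      simp only [mergeA_loop]
      by_cases hlt : i < o.length ∨ j < n.length
      · rw [if_pos hlt]
        split
        · -- old_ref exhausted: emit '-' into every row, consume new_row
          rename_i ho
          have hio : o.length ≤ i := List.getElem?_eq_none_iff.mp ho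
          have hjn : j < n.length := by omega
          rw [ih i (j+1) _ _ (by omega) (by simp [hm]),
              List.drop_eq_nil_of_le hio, List.drop_eq_getElem_cons hjn]
          simp only [opsL]
          simp [emitL, List.zipWith_map_left, List.getD_eq_getElem?_getD, List.tail_drop]
        · -- new_ref exhausted: consume old columns, emit '-' into merged_new
          rename_i co ho hn2
          have hin : i < o.length := (List.getElem?_eq_some_iff.mp ho).1
          have hjn : n.length ≤ j := List.getElem?_eq_none_iff.mp hn2
          rw [ih (i+1) j _ _ (by omega) (by simp [hm]),
              List.drop_eq_nil_of_le hjn, List.drop_eq_getElem_cons hin]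
          simp only [opsL]
          simp [emitL, zipWith_zipWith_right, List.getD_eq_getElem?_getD, List.tail_drop]
        · -- both present: the four comparison branches
          rename_i co cn ho hn2
          obtain ⟨hin, hvo⟩ := List.getElem?_eq_some_iff.mp ho
          obtain ⟨hjn, hvn⟩ := List.getElem?_eq_some_iff.mp hn2
          subst hvo
          subst hvn
          by_cases hc1 : o[i] = n[j]
          · rw [if_pos hc1, ih (i+1) (j+1) _ _ (by omega) (by simp [hm]),
                List.drop_eq_getElem_cons hin, List.drop_eq_getElem_cons hjn]
            simp only [opsL]
            rw [if_pos hc1]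
            simp [emitL, zipWith_zipWith_right, List.getD_eq_getElem?_getD, List.tail_drop]
          · rw [if_neg hc1]
            by_cases hc2 : o[i] = '-'
            · rw [if_pos hc2, ih (i+1) j _ _ (by omega) (by simp [hm]),
                  List.drop_eq_getElem_cons hin, List.drop_eq_getElem_cons hjn]
              simp only [opsL]
              rw [if_neg hc1, if_pos hc2]
              simp [emitL, zipWith_zipWith_right, List.getD_eq_getElem?_getD, List.tail_drop]
            · rw [if_neg hc2]
              by_cases hc3 : n[j] = '-'
              · rw [if_pos hc3, ih i (j+1) _ _ (by omega) (by simp [hm]),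
                    List.drop_eq_getElem_cons hin, List.drop_eq_getElem_cons hjn]
                simp only [opsL]
                rw [if_neg hc1, if_neg hc2, if_pos hc3]
                simp [emitL, List.zipWith_map_left, List.getD_eq_getElem?_getD, List.tail_drop]
              · rw [if_neg hc3, ih (i+1) (j+1) _ _ (by omega) (by simp [hm]),
                    List.drop_eq_getElem_cons hin, List.drop_eq_getElem_cons hjn]
                simp only [opsL]
                rw [if_neg hc1, if_neg hc2, if_neg hc3]
                simp [emitL, zipWith_zipWith_right, List.getD_eq_getElem?_getD, List.tail_drop]
      · rw [if_neg hlt]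
        rw [List.drop_eq_nil_of_le (by omega), List.drop_eq_nil_of_le (by omega)]
        simp only [opsL, emitL, List.append_nil]
        rw [zipWith_left mrows orows (by omega)]

theorem map_ofList_zipWith_nil (f : List Char → List Char) (l : List String) :
    List.map String.ofList
        (List.zipWith (fun m r => m ++ f r) (List.map (fun _ => ([] : List Char)) l)
          (l.map String.toList)) =
      l.map (fun r => String.ofList (f r.toList)) := by
  induction l with
  | nil => simp
  | cons r l ih => simp at ih; simp [ih]

theorem merge_gapped_reference_py_spec : Claim_equal_merge_gapped_reference_py := by
  intro old_ref old_rows new_ref new_row _hdom _hpre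
  unfold Spec_merge_gapped_reference_py
  unfold merge_gapped_reference_py merge_gapped_reference_py_alt
  rw [mergeA_loop_eq _ _ _ _ _ _ _ _ _ (by omega) (by simp)]
  rw [opsB_eq_opsL _ _ _ _ _ _ (by omega)]
  simp only [List.drop_zero, List.nil_append, Prod.mk.injEq]
  refine ⟨?_, ?_⟩
  · simp only [emitB_eq_emitL, List.drop_zero]
    exact map_ofList_zipWith_nil (fun y => emitL (opsL old_ref.toList new_ref.toList) y true) old_rows
  · rw [emitB_eq_emitL]
    simp
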